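-- pv_equiv track=rewrite | github.com/juliandito/python-exercises | List2d/no10_horizon.py | find_horizon
-- ===== SOURCE A (Python) =====
-- def find_horizon(matrix, word):
--
--     position = None
--     for i in range(0, len(matrix)):
--         word_from_list = ""
--         for j in range(0, len(matrix[i])):
--             word_from_list += matrix[i][j]
--
--         if word_from_list == word:
--             position = i
--
--     return position
-- ===== SOURCE B (Python) =====
-- def find_horizon(matrix, word):
--     # Scan rows from the bottom; the first match from the end is A's last match.
--     for i, row in reversed(list(enumerate(matrix))):
--         if "".join(row) == word:
--             return i
--     return None
-- ===== Notes on version B (the rewrite author's own statement) =====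
-- stated objective: simpler
-- what changed: Replaces the exhaustive forward scan with a last-wins accumulator and a hand-rolled character loop by a reversed enumerate scan that joins each row and returns the first (i.e. last-in-order) matching index immediately.
import Mathlib
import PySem

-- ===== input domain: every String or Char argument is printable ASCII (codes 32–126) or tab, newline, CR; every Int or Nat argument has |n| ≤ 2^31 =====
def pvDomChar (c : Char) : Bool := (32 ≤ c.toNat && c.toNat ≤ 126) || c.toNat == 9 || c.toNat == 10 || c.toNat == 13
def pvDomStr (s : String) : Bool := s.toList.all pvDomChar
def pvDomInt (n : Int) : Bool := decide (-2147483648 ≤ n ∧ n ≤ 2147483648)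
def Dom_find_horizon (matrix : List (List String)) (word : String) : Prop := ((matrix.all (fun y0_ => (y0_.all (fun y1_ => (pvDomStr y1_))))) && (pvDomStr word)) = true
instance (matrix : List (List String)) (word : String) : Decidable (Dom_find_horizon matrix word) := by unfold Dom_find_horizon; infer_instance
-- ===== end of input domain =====

-- B replaces A's exhaustive forward scan with a last-wins accumulator by a reversed
-- enumerate scan with early return (simpler); both are proved to return the same index.

-- ===== PORT A =====
-- Python string concatenation/comparison is ported on List Char (exact: String ↔ its code points).
def find_horizon (matrix : List (List String)) (word : String) : Option Int :=
  (PySem.List.pyRange 0 (matrix.length : Int) 1).foldl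
    (fun position i =>
      let row := PySem.List.pyGetD matrix i []
      let word_from_list := (PySem.List.pyRange 0 (row.length : Int) 1).foldl
        (fun acc j => acc ++ (PySem.List.pyGetD row j "").toList) ([] : List Char)
      if word_from_list = word.toList then some i else position)
    none

-- ===== PORT B =====
def find_horizon_altGo (word : String) : List (Int × List String) → Option Int
  | [] => none
  | (i, row) :: rest =>
    if PySem.Str.join "" row = word then some i else find_horizon_altGo word rest

def find_horizon_alt (matrix : List (List String)) (word : String) : Option Int :=
  find_horizon_altGo word (PySem.List.enumerate matrix 0).reverse

-- ===== PRECONDITION & SPEC =====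
def Spec_find_horizon (matrix : List (List String)) (word : String) (out : Option Int) : Prop := out = find_horizon_alt matrix word
instance (matrix : List (List String)) (word : String) (out : Option Int) : Decidable (Spec_find_horizon matrix word out) := by unfold Spec_find_horizon; infer_instance

-- ===== CLAIM (what is proved, stated in full; the proofs are below) =====
def Claim_equal_find_horizon : Prop := ∀ (matrix : List (List String)) (word : String), Dom_find_horizon matrix word → Spec_find_horizon matrix word (find_horizon matrix word)

-- ===== LEMMAS AND PROOFS =====

theorem intersperse_nil_flatten (l : List (List Char)) :
    (List.intersperse [] l).flatten = l.flatten := by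
  induction l with
  | nil => rfl
  | cons x xs ih =>
    cases xs with
    | nil => rfl
    | cons y ys =>
      rw [List.intersperse_cons₂]
      simp_all

theorem join_nil_eq_flatten (l : List (List Char)) : PySem.Chars.join [] l = l.flatten := by
  simp only [PySem.Chars.join, List.intercalate]
  exact intersperse_nil_flatten l

-- A's hand-built row word equals B's join, as the comparison with `word`.
theorem cond_iff (row : List String) (word : String) :
    (row.flatMap String.toList = word.toList) ↔ (PySem.Str.join "" row = word) := by
  rw [← String.toList_inj, PySem.Str.toList_join]
  simp [join_nil_eq_flatten, List.flatMap]

-- A's inner character loop builds exactly the concatenation of the row.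
theorem inner_fold_eq (row : List String) :
    (PySem.List.pyRange 0 (row.length : Int) 1).foldl
      (fun acc j => acc ++ (PySem.List.pyGetD row j "").toList) ([] : List Char)
    = row.flatMap String.toList := by
  rw [PySem.List.foldl_pyRange_zero_pyGetD' row "" (fun acc s => acc ++ s.toList) []]
  rw [PySem.List.foldl_append_eq_flatMap]
  rfl

-- A last-wins foldl equals the first match of the reversed list.
theorem lastwin (word : String) (l : List (Int × List String)) (acc : Option Int) :
    l.foldl (fun pos p => if PySem.Str.join "" p.2 = word then some p.1 else pos) acc
      = (find_horizon_altGo word l.reverse).or acc := by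
  induction l using List.reverseRecOn generalizing acc with
  | nil => rfl
  | append_singleton l x ih =>
    rw [List.foldl_append, List.reverse_append]
    simp only [List.foldl_cons, List.foldl_nil, List.reverse_cons, List.reverse_nil,
      List.nil_append, List.singleton_append]
    rcases x with ⟨i, row⟩
    by_cases h : PySem.Str.join "" row = word
    · simp [find_horizon_altGo, h]
    · simp [find_horizon_altGo, h, ih]

-- ===== VERDICT (by name: the statement is the Claim_ definition above) =====
theorem find_horizon_spec : Claim_equal_find_horizon := by
  unfold Claim_equal_find_horizon Spec_find_horizon
  intro matrix word _
  unfold find_horizon find_horizon_alt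
  simp only [inner_fold_eq, cond_iff]
  have hmap : PySem.List.enumerate matrix 0
      = (PySem.List.pyRange 0 (matrix.length : Int) 1).map
          (fun j => (j, PySem.List.pyGetD matrix j [])) := by
    simpa using PySem.List.enumerate_eq_map_pyRange matrix ([] : List String)
  rw [hmap, ← Option.or_none (o := find_horizon_altGo word _), ← lastwin word _ none,
    List.foldl_map]
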